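-- pv_equiv track=rewrite | github.com/Stasyar/-PerformanceLab | task1.py | circular_array_path
-- ===== SOURCE A (Python) =====
-- def circular_array_path(n, m):
--     circular_array = list(range(1, n + 1))
--     path = ''
--     current_index = 0
--
--     while True:
--         path += str(circular_array[current_index])
--
--         next_index = (current_index + m - 1) % n
--
--         if next_index == 0:
--             break
--
--         current_index = next_index
--
--     return path
-- ===== SOURCE B (Python) =====
-- def circular_array_path(n, m):
--     arr = list(range(1, n + 1))
--     s = (m - 1) % n
--     # cycle length of stepping by s in Z_n: n // gcd(n, s)
--     a, b = n, s
--     while b: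
--         a, b = b, a % b
--     length = n // a
--     return ''.join(str(arr[(i * s) % n]) for i in range(length))
-- ===== Notes on version B (the rewrite author's own statement) =====
-- stated objective: alternative
-- what changed: Replaces A's follow-the-pointer while loop (append, step by m-1 mod n, break on return to 0) with a closed-form cycle length n // gcd(n, (m-1)%n) and direct arithmetic indexing arr[(i*s)%n] over range(length).
import Mathlib
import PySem

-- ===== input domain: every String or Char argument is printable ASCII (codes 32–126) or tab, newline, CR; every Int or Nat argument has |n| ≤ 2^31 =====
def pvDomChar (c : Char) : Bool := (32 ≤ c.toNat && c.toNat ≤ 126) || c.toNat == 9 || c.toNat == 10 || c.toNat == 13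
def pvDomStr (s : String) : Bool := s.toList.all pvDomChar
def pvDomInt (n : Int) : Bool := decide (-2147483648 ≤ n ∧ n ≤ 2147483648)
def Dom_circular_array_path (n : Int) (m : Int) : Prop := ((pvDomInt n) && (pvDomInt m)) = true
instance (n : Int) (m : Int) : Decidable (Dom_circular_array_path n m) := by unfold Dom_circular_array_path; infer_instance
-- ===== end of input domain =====

-- B replaces A's follow-the-pointer while loop with a closed-form cycle length
-- n // gcd(n, (m-1)%n) and direct arithmetic indexing; same return value on all n ≥ 1.

-- ===== PORT A =====
-- while True: append str(arr[cur]); next = (cur+m-1) % n; break if next == 0.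
-- Fuel n.toNat+1 only makes the recursion total; within Pre_ the loop runs n//gcd ≤ n times.
def circularGoA (n m : Int) : Nat → Int → String → String
  | 0, _, path => path
  | fuel+1, cur, path =>
    match PySem.List.pyGet? (PySem.List.pyRange 1 (n+1) 1) cur with
    | none => path  -- IndexError (only when n ≤ 0); excluded by Pre_
    | some v =>
      let path2 := path ++ PySem.Int.toStr v
      let next := PySem.Int.mod (cur + m - 1) n
      if next = 0 then path2 else circularGoA n m fuel next path2

def circular_array_path (n : Int) (m : Int) : String :=
  circularGoA n m (n.toNat + 1) 0 ""

-- ===== PORT B =====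
-- Euclid loop 'while b: a, b = b, a % b' of Source B; fuel b.natAbs+1 only makes it total
-- (|a % b| < |b| at every step).
def gcdGoB : Nat → Int → Int → Int
  | 0, a, _ => a
  | fuel+1, a, b => if b = 0 then a else gcdGoB fuel b (PySem.Int.mod a b)

def circular_array_path_alt (n : Int) (m : Int) : String :=
  let arr := PySem.List.pyRange 1 (n+1) 1
  let s := PySem.Int.mod (m-1) n
  let g := gcdGoB (s.natAbs + 1) n s
  let length := PySem.Int.floordiv n g
  PySem.Str.join "" ((PySem.List.pyRange 0 length 1).map (fun i =>
    match PySem.List.pyGet? arr (PySem.Int.mod (i*s) n) with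
    | some v => PySem.Int.toStr v
    | none => ""))  -- IndexError branch, unreachable for n ≥ 1

-- ===== PRECONDITION & SPEC =====
-- Pre_ excludes exactly n ≤ 0, where the Python A raises (IndexError on arr[0];
-- for n = 0 also ZeroDivisionError in the modulo).
def Pre_circular_array_path (n : Int) (m : Int) : Prop := 1 ≤ n
instance (n : Int) (m : Int) : Decidable (Pre_circular_array_path n m) := by unfold Pre_circular_array_path; infer_instance
def pvWitness_circular_array_path : Int × Int := (6, 4)

def Spec_circular_array_path (n : Int) (m : Int) (out : String) : Prop := out = circular_array_path_alt n m
instance (n : Int) (m : Int) (out : String) : Decidable (Spec_circular_array_path n m out) := by unfold Spec_circular_array_path; infer_instance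

-- ===== CLAIM (what is proved, stated in full; the proofs are below) =====
def Claim_equal_circular_array_path : Prop := ∀ (n : Int) (m : Int), Dom_circular_array_path n m → Pre_circular_array_path n m → Spec_circular_array_path n m (circular_array_path n m)

-- ===== LEMMAS AND PROOFS =====

-- the common description: concatenation of str(1 + (k*S % N)) for k = k0, …, k0+d-1
def chunkStr (f : Nat → String) : Nat → Nat → String
  | _, 0 => ""
  | k, d+1 => f k ++ chunkStr f (k+1) d

theorem strjoin_nil_cons (p : String) (rest : List String) :
    PySem.Str.join "" (p :: rest) = p ++ PySem.Str.join "" rest := by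
  cases rest with
  | nil => simp [PySem.Str.join, PySem.Chars.join_singleton, PySem.Chars.join_nil]
  | cons q r => simp [PySem.Str.join, PySem.Chars.join_cons_cons]

theorem strjoin_map_range_gen (f : Nat → String) (d : Nat) : ∀ k,
    PySem.Str.join "" ((List.range d).map (fun j => f (k + j))) = chunkStr f k d := by
  induction d with
  | zero => intro k; simp [PySem.Str.join, PySem.Chars.join_nil, chunkStr]
  | succ d ih =>
    intro k
    have h : (fun j => f (k + (j + 1))) = (fun j => f (k + 1 + j)) := by
      funext j; congr 1; omega
    simp only [List.range_succ_eq_map, List.map_cons, List.map_map, strjoin_nil_cons,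
      Function.comp_def, Nat.succ_eq_add_one, h, chunkStr, Nat.add_zero]
    rw [ih (k+1)]

theorem strjoin_map_range (f : Nat → String) (d : Nat) :
    PySem.Str.join "" ((List.range d).map f) = chunkStr f 0 d := by
  have := strjoin_map_range_gen f d 0
  simpa using this

theorem gcdGoB_eq (fuel : Nat) : ∀ (a b : Int), 0 ≤ a → 0 ≤ b → b.natAbs < fuel →
    gcdGoB fuel a b = (Nat.gcd a.toNat b.toNat : Int) := by
  induction fuel with
  | zero => intro a b _ _ h; omega
  | succ f ih =>
    intro a b ha hb hf
    by_cases hb0 : b = 0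
    · subst hb0; simp [gcdGoB, Int.toNat_of_nonneg ha]
    · have hbpos : 0 < b := lt_of_le_of_ne hb (Ne.symm hb0)
      have hmod : PySem.Int.mod a b = a % b := PySem.Int.mod_eq_emod_of_pos hbpos
      have h1 : 0 ≤ a % b := Int.emod_nonneg a hb0
      have h2 : a % b < b := Int.emod_lt_of_pos a hbpos
      have hrec := ih b (a % b) hb h1 (by omega)
      simp only [gcdGoB, hb0, if_false, hmod, hrec]
      congr 1
      have ht : (a % b).toNat = a.toNat % b.toNat := by
        have : a % b = ((a.toNat % b.toNat : Nat) : Int) := by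
          conv_lhs => rw [← Int.toNat_of_nonneg ha, ← Int.toNat_of_nonneg hb]
          exact Int.natCast_mod a.toNat b.toNat ▸ rfl
        rw [this, Int.toNat_natCast]
      rw [ht, Nat.gcd_comm b.toNat, ← Nat.gcd_rec b.toNat a.toNat, Nat.gcd_comm]

theorem key_dvd (N S k : Nat) (hN : 0 < N) :
    N ∣ k * S ↔ (N / Nat.gcd N S) ∣ k := by
  set g := Nat.gcd N S with hg
  have hgpos : 0 < g := Nat.gcd_pos_of_pos_left S hN
  have hNg : g * (N / g) = N := Nat.mul_div_cancel' (Nat.gcd_dvd_left N S)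
  have hSg : g * (S / g) = S := Nat.mul_div_cancel' (Nat.gcd_dvd_right N S)
  have cop : Nat.Coprime (N / g) (S / g) := Nat.coprime_div_gcd_div_gcd hgpos
  constructor
  · intro h
    have hkS : k * S = g * (k * (S / g)) := by
      conv_lhs => rw [← hSg]
      ring
    have h' : g * (N / g) ∣ g * (k * (S / g)) := by rw [hNg, ← hkS]; exact h
    have h'' : (N / g) ∣ k * (S / g) := (Nat.mul_dvd_mul_iff_left hgpos).mp h'
    exact Nat.Coprime.dvd_of_dvd_mul_right cop h''
  · intro h
    have hNg' : N = (N / g) * g := (Nat.div_mul_cancel (Nat.gcd_dvd_left N S)).symm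
    rw [hNg']
    calc (N / g) * g ∣ k * g := Nat.mul_dvd_mul_right h g
      _ ∣ k * S := Nat.mul_dvd_mul_left k (Nat.gcd_dvd_right N S)

theorem main_eq (n m : Int) (hn : 1 ≤ n) :
    circular_array_path n m = circular_array_path_alt n m := by
  have hnpos : (0:Int) < n := by omega
  set N := n.toNat with hNdef
  have hNpos : 0 < N := by omega
  have hnN : n = (N : Int) := by omega
  set s := PySem.Int.mod (m-1) n with hsdef
  have hsemod : s = (m-1) % n := PySem.Int.mod_eq_emod_of_pos hnpos
  have hs0 : 0 ≤ s := by rw [hsemod]; exact Int.emod_nonneg _ (by omega)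
  have hsn : s < n := by rw [hsemod]; exact Int.emod_lt_of_pos _ hnpos
  set S := s.toNat with hSdef
  have hsS : s = (S : Int) := by omega
  set g := Nat.gcd N S with hgdef
  have hgpos : 0 < g := Nat.gcd_pos_of_pos_left S hNpos
  set L := N / g with hLdef
  have hLpos : 0 < L := Nat.div_pos (Nat.le_of_dvd hNpos (Nat.gcd_dvd_left N S)) hgpos
  have hLN : L ≤ N := Nat.div_le_self N g
  set f : Nat → String := fun k => PySem.Int.toStr (1 + ((k * S % N : Nat) : Int)) with hfdef
  have hf : ∀ k : Nat, PySem.Int.toStr (1 + ((k * S % N : Nat) : Int)) = f k := fun _ => rfl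
  -- the element fetched at index k*S % N
  have hget : ∀ k : Nat, PySem.List.pyGet? (PySem.List.pyRange 1 (n+1) 1) ((k * S % N : Nat) : Int)
      = some (1 + ((k * S % N : Nat) : Int)) := by
    intro k
    rw [PySem.List.pyGet?_natCast, PySem.List.getElem?_pyRange_one]
    have : (n + 1 - 1).toNat = N := by omega
    rw [this, if_pos (Nat.mod_lt _ hNpos)]
  -- the next index computed by A's loop
  have hnext : ∀ k : Nat,
      PySem.Int.mod (((k * S % N : Nat) : Int) + m - 1) n = (((k+1) * S % N : Nat) : Int) := by
    intro k
    rw [PySem.Int.mod_eq_emod_of_pos hnpos]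
    have h1 : ((k * S % N : Nat) : Int) + m - 1 = ((k * S % N : Nat) : Int) + (m - 1) := by ring
    rw [h1, Int.add_emod, ← hsemod, hsS, hnN]
    have h2 : ((k * S % N : Nat) : Int) % (N : Int) = ((k * S % N % N : Nat) : Int) := by
      exact_mod_cast (Int.natCast_mod (k * S % N) N).symm
    rw [h2, Nat.mod_mod_of_dvd _ dvd_rfl]
    have h3 : ((k * S % N : Nat) : Int) + (S : Int) = ((k * S % N + S : Nat) : Int) := by push_cast; ring
    rw [h3]
    have h4 : (((k * S % N + S : Nat) : Int)) % (N : Int) = (((k * S % N + S) % N : Nat) : Int) := by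
      exact_mod_cast (Int.natCast_mod (k * S % N + S) N).symm
    rw [h4]
    congr 1
    rw [Nat.mod_add_mod]
    congr 1
    ring
  -- the break condition
  have hbrk : ∀ k : Nat, ((((k+1) * S % N : Nat) : Int) = 0 ↔ L ∣ (k+1)) := by
    intro k
    rw [Int.natCast_eq_zero, Nat.dvd_iff_mod_eq_zero.symm]
    exact key_dvd N S (k+1) hNpos
  -- A's loop, characterised
  have loopA : ∀ d : Nat, 0 < d → ∀ k : Nat, k + d = L → ∀ fuel : Nat, d ≤ fuel → ∀ path : String,
      circularGoA n m fuel ((k * S % N : Nat) : Int) path = path ++ chunkStr f k d := by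
    intro d
    induction d with
    | zero => intro h; omega
    | succ d ih =>
      intro _ k hk fuel hfuel path
      obtain ⟨f', rfl⟩ : ∃ f', fuel = f' + 1 := ⟨fuel - 1, by omega⟩
      simp only [circularGoA, hget k, hnext k]
      by_cases hd : d = 0
      · subst hd
        have hc : (((k+1) * S % N : Nat) : Int) = 0 := by
          rw [hbrk k]
          have : k + 1 = L := by omega
          rw [this]
        rw [if_pos hc]
        rw [hf k]
        simp [chunkStr]
      · have hc : ¬ ((((k+1) * S % N : Nat) : Int) = 0) := by
          intro h
          have := Nat.le_of_dvd (by omega) ((hbrk k).mp h)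
          omega
        rw [if_neg hc]
        rw [ih (by omega) (k+1) (by omega) f' (by omega) (path ++ PySem.Int.toStr (1 + ((k * S % N : Nat) : Int)))]
        rw [hf k, String.append_assoc]
        rfl
  -- A's result
  have hA : circular_array_path n m = chunkStr f 0 L := by
    have h0 : ((0 * S % N : Nat) : Int) = 0 := by simp
    have := loopA L hLpos 0 (by omega) (N + 1) (by omega) ""
    rw [h0] at this
    show circularGoA n m (N + 1) 0 "" = chunkStr f 0 L
    rw [this]
    simp
  -- B's result
  have hB : circular_array_path_alt n m = chunkStr f 0 L := by
    simp only [circular_array_path_alt]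
    have hgcd : gcdGoB (s.natAbs + 1) n s = (g : Int) := by
      rw [gcdGoB_eq _ n s (by omega) hs0 (by omega), hgdef, ← hNdef, ← hSdef]
    rw [hgcd]
    have hlen : PySem.Int.floordiv n (g : Int) = (L : Int) := by
      rw [hnN, PySem.Int.floordiv_natCast N g, hLdef]
    rw [hlen, ← strjoin_map_range f L]
    congr 1
    rw [PySem.List.pyRange_one 0 (L : Int)]
    simp only [Int.sub_zero, Int.toNat_natCast, List.map_map]
    apply List.map_congr_left
    intro k _
    rw [← hsdef]
    have hm : PySem.Int.mod ((0 + (k : Int)) * s) n = ((k * S % N : Nat) : Int) := by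
      rw [hsS, hnN, zero_add]
      have : (k : Int) * (S : Int) = ((k * S : Nat) : Int) := by push_cast; ring
      rw [this]
      exact PySem.Int.mod_natCast (k * S) N
    simp only [Function.comp_def, hm, hget k]
    exact hf k
  rw [hA, hB]

-- ===== VERDICT (by name: the statement is the Claim_ definition above) =====
theorem circular_array_path_spec : Claim_equal_circular_array_path := by
  intro n m _ hpre
  exact main_eq n m hpre
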